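-- pv_equiv track=rewrite | github.com/thormacy/SimpleChatbot | data/preprocess.py | reformat_vector
-- ===== SOURCE A (Python) =====
-- def reformat_vector(vector):
--     trainingSamples = []
--     for i, line in enumerate(vector):
--         if i%2 == 0:
--             tmp = []
--             tmp.append(line.split())
--         else:
--             tmp.append(line.split())
--             trainingSamples.append(tmp)
--     for i in range(len(trainingSamples)):
--         for j in range(len(trainingSamples[0])):
--             trainingSamples[i][j] = [int(x) for x in trainingSamples[i][j]]
--     return trainingSamples
-- ===== SOURCE B (Python) =====
-- def reformat_vector(vector):
--     # single pass: group consecutive (question, answer) lines with zip(it, it)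
--     # and convert tokens to ints as each pair is built (no in-place second phase)
--     it = iter(vector)
--     return [[[int(t) for t in q.split()], [int(t) for t in a.split()]]
--             for q, a in zip(it, it)]
-- ===== Notes on version B (the rewrite author's own statement) =====
-- stated objective: simpler
-- what changed: A pairs lines by an enumerate/parity state machine and then converts cells to ints in a second nested index loop mutating the structure in place; B builds the result in one pass, pairing consecutive lines with zip(it, it) and converting each pair's tokens as it is built.
import Mathlib
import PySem

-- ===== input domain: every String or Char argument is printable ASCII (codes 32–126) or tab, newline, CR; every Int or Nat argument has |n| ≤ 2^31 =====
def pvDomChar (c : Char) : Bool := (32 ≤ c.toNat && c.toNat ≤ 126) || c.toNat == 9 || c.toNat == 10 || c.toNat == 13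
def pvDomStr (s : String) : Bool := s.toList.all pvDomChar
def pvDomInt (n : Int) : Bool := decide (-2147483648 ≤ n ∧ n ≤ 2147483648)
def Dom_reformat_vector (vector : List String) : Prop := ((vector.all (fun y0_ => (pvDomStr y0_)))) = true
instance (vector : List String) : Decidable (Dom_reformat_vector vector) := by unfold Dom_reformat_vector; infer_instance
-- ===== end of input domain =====

-- B replaces A's two-phase enumerate/parity pairing plus in-place int-conversion loop by a
-- single pass that pairs consecutive lines and converts their tokens at once (objective: simpler).

-- ===== PORT A =====
-- int(x); Pre_ guarantees the parse succeeds, so the default 0 is never the result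
def pvIntA (x : String) : Int := (PySem.Int.ofStr? x).getD 0

-- the first loop: state (tmp, trainingSamples); 'tmp' starts undefined in Python but is
-- always assigned on i = 0 before being read, so the initial [] is never consumed
def pvPhase1A (vector : List String) : List (List (List String)) :=
  ((PySem.List.enumerate vector).foldl
    (fun st (p : Int × String) =>
      if PySem.Int.mod p.1 2 = 0 then
        (([PySem.Str.split₀ p.2] : List (List String)), st.2)
      else
        (st.1 ++ [PySem.Str.split₀ p.2], st.2 ++ [st.1 ++ [PySem.Str.split₀ p.2]]))
    (([] : List (List String)), ([] : List (List (List String))))).2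

-- the second loop mutates trainingSamples[i][j] in place, changing the cell type from
-- list[str] to list[int]; that is untypeable as in-place update, so it is ported by hand as
-- the same index-driven double loop rebuilding the structure: every cell (i, j) with
-- j < len(trainingSamples[0]) is overwritten exactly once with the int-conversion of its
-- original (string) content, and reads happen only before the cell's single write, so
-- reading from the pre-conversion list is exact (each row has length len(trainingSamples[0]) = 2).
def reformat_vector (vector : List String) : List (List (List Int)) :=
  (PySem.List.pyRange 0 (pvPhase1A vector).length 1).map (fun i =>
    (PySem.List.pyRange 0 ((PySem.List.pyGetD (pvPhase1A vector) 0 []).length) 1).map (fun j =>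
      (PySem.List.pyGetD (PySem.List.pyGetD (pvPhase1A vector) i []) j []).map pvIntA))

-- ===== PORT B =====
-- [int(t) for t in line.split()]
def pvLineB (s : String) : List Int :=
  (PySem.Str.split₀ s).map (fun t => (PySem.Int.ofStr? t).getD 0)

-- zip(it, it): consume the list two elements at a time
def pvPairsB {α : Type} : List α → List (α × α)
  | q :: a :: l => (q, a) :: pvPairsB l
  | _ => []

def reformat_vector_alt (vector : List String) : List (List (List Int)) :=
  (pvPairsB vector).map (fun p => [pvLineB p.1, pvLineB p.2])

-- ===== PRECONDITION & SPEC =====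
-- Pre_ excludes exactly the inputs on which Python A raises ValueError: some token of a
-- paired line (the trailing unpaired line is dropped unconverted) does not parse as an int.
def Pre_reformat_vector (vector : List String) : Prop :=
  ∀ s ∈ vector.take (2 * (vector.length / 2)),
    ∀ t ∈ PySem.Str.split₀ s, (PySem.Int.ofStr? t).isSome = true
instance (vector : List String) : Decidable (Pre_reformat_vector vector) := by
  unfold Pre_reformat_vector; infer_instance
def pvWitness_reformat_vector : List String := ["1 2", "3 -4", "oops"]

def Spec_reformat_vector (vector : List String) (out : List (List (List Int))) : Prop := out = reformat_vector_alt vector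
instance (vector : List String) (out : List (List (List Int))) : Decidable (Spec_reformat_vector vector out) := by unfold Spec_reformat_vector; infer_instance

-- ===== CLAIM (what is proved, stated in full; the proofs are below) =====
def Claim_equal_reformat_vector : Prop := ∀ (vector : List String), Dom_reformat_vector vector → Pre_reformat_vector vector → Spec_reformat_vector vector (reformat_vector vector)

-- ===== LEMMAS AND PROOFS =====

-- the pairs built by A's first loop, written structurally via B's pairing
theorem pvPhase1A_aux (l : List String) (tmp : List (List String))
    (acc : List (List (List String))) (k : Int) (hk : PySem.Int.mod k 2 = 0) :
    ((PySem.List.enumerate l k).foldl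
      (fun st (p : Int × String) =>
        if PySem.Int.mod p.1 2 = 0 then
          (([PySem.Str.split₀ p.2] : List (List String)), st.2)
        else
          (st.1 ++ [PySem.Str.split₀ p.2], st.2 ++ [st.1 ++ [PySem.Str.split₀ p.2]]))
      (tmp, acc)).2
    = acc ++ (pvPairsB l).map (fun p => [PySem.Str.split₀ p.1, PySem.Str.split₀ p.2]) := by
  match l with
  | [] => simp [PySem.List.enumerate_nil, pvPairsB]
  | [a] =>
    simp only [PySem.List.enumerate_cons, PySem.List.enumerate_nil, List.foldl_cons,
      List.foldl_nil, hk]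
    simp [pvPairsB]
  | a :: b :: l =>
    rw [PySem.Int.mod_eq_emod_of_pos (by omega)] at hk
    have hodd : PySem.Int.mod (k + 1) 2 ≠ 0 := by
      rw [PySem.Int.mod_eq_emod_of_pos (by omega)]; omega
    have heven : PySem.Int.mod (k + 1 + 1) 2 = 0 := by
      rw [PySem.Int.mod_eq_emod_of_pos (by omega)]; omega
    have hkeven : PySem.Int.mod k 2 = 0 := by
      rw [PySem.Int.mod_eq_emod_of_pos (by omega)]; exact hk
    rw [PySem.List.enumerate_cons, PySem.List.enumerate_cons]
    simp only [List.foldl_cons, hkeven, hodd, if_true]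
    rw [pvPhase1A_aux l _ _ (k + 1 + 1) heven]
    simp [pvPairsB]

theorem pvPhase1A_eq (vector : List String) :
    pvPhase1A vector
      = (pvPairsB vector).map (fun p => [PySem.Str.split₀ p.1, PySem.Str.split₀ p.2]) := by
  unfold pvPhase1A
  rw [pvPhase1A_aux vector [] [] 0 (by decide)]
  simp

theorem reformat_vector_eq_alt (vector : List String) :
    reformat_vector vector = reformat_vector_alt vector := by
  unfold reformat_vector reformat_vector_alt
  rw [pvPhase1A_eq]
  -- rewrite the outer index loop as a map over the rows (m abstracts len(trainingSamples[0]))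
  have houter :
      ∀ (ts : List (List (List String))) (m : Int),
        (PySem.List.pyRange 0 (ts.length : Int) 1).map (fun i =>
          (PySem.List.pyRange 0 m 1).map (fun j =>
            (PySem.List.pyGetD (PySem.List.pyGetD ts i ([] : List (List String))) j ([] : List String)).map pvIntA))
        = ts.map (fun row =>
            (PySem.List.pyRange 0 m 1).map (fun j =>
              (PySem.List.pyGetD row j ([] : List String)).map pvIntA)) := by
    intro ts m
    have hcomp :
        (PySem.List.pyRange 0 (ts.length : Int) 1).map (fun i =>
          (PySem.List.pyRange 0 m 1).map (fun j =>
            (PySem.List.pyGetD (PySem.List.pyGetD ts i ([] : List (List String))) j ([] : List String)).map pvIntA))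
        = ((PySem.List.pyRange 0 (ts.length : Int) 1).map
            (fun i => PySem.List.pyGetD ts i ([] : List (List String)))).map
            (fun row => (PySem.List.pyRange 0 m 1).map (fun j =>
              (PySem.List.pyGetD row j ([] : List String)).map pvIntA)) := by
      rw [List.map_map]
      rfl
    rw [hcomp, PySem.List.map_pyGetD_pyRange_zero']
  -- each row is [split q, split a]; the inner loop over range(2) converts both cells
  have hrow : ∀ q a : String,
      (PySem.List.pyRange 0 (((2 : Nat) : Int)) 1).map (fun j =>
        (PySem.List.pyGetD [PySem.Str.split₀ q, PySem.Str.split₀ a] j ([] : List String)).map pvIntA)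
      = [pvLineB q, pvLineB a] := by
    intro q a
    have h01 : PySem.List.pyRange 0 (((2 : Nat) : Int)) 1 = [0, 1] := by decide
    rw [h01]
    simp [PySem.List.pyGetD, PySem.List.pyGet?, PySem.List.pyIdx?, pvLineB, pvIntA]
  cases h : pvPairsB vector with
  | nil => simp
  | cons p P =>
    rw [List.map_cons, houter, PySem.List.pyGetD_zero_cons]
    have h2 : ((([PySem.Str.split₀ p.1, PySem.Str.split₀ p.2] : List (List String)).length : Nat) : Int)
        = (((2 : Nat)) : Int) := rfl
    rw [h2, List.map_cons, hrow p.1 p.2, List.map_cons, List.map_map]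
    refine congrArg (List.cons _) ?_
    apply List.map_congr_left
    intro q _
    exact hrow q.1 q.2

-- ===== VERDICT (by name: the statement is the Claim_ definition above) =====
theorem reformat_vector_spec : Claim_equal_reformat_vector := by
  intro vector _ _
  unfold Spec_reformat_vector
  exact reformat_vector_eq_alt vector
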